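-- pv_equiv track=rewrite | github.com/Satyam25403/ICP-1 | week8.py | find
-- ===== SOURCE A (Python) =====
-- def find(grid, word):
--     rows = len(grid)
--     cols = len(grid[0])
--
--     def is_valid(r, c):
--         return 0 <= r < rows and 0 <= c < cols
--
--     def search(r, c, dr, dc):
--         for char in word:
--             #if not valid cell or not matching character
--             if not is_valid(r, c) or grid[r][c] != char:
--                 return False
--             r += dr
--             c += dc
--         return True
--
--     directions = [(0, 1), (1, 0), (1, 1), (-1, 1), (0, -1), (-1, 0), (-1, -1), (1, -1)]
--     ans = []
--     for r in range(rows):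
--         for c in range(cols):
--             for dr, dc in directions:
--                 if search(r, c, dr, dc):
--                     ans.append((r, c))
--     return ans
-- ===== SOURCE B (Python) =====
-- def find(grid, word):
--     rows = len(grid)
--     cols = len(grid[0])
--     dirs = [(0, 1), (1, 0), (1, 1), (-1, 1), (0, -1), (-1, 0), (-1, -1), (1, -1)]
--     all_cells = [(r, c) for r in range(rows) for c in range(cols)]
--     match_sets = []
--     for dr, dc in dirs:
--         if not word:
--             match_sets.append(set(all_cells))
--             continue
--         # cur = start cells from which the suffix word[k:] matches in direction (dr, dc)
--         cur = {(r, c) for (r, c) in all_cells if grid[r][c] == word[-1]}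
--         for ch in reversed(word[:-1]):
--             cur = {(r - dr, c - dc) for (r, c) in cur
--                    if 0 <= r - dr < rows and 0 <= c - dc < cols and grid[r - dr][c - dc] == ch}
--         match_sets.append(cur)
--     return [(r, c) for (r, c) in all_cells for m in match_sets if (r, c) in m]
-- ===== Notes on version B (the rewrite author's own statement) =====
-- stated objective: alternative
-- what changed: Replaces A's per-cell per-direction character-walk (the inner search loop) by a per-direction dynamic program: build, backwards over the word, the set of cells from which each word suffix matches, so the inner scan disappears and the final pass only tests set membership.
import Mathlib
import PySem

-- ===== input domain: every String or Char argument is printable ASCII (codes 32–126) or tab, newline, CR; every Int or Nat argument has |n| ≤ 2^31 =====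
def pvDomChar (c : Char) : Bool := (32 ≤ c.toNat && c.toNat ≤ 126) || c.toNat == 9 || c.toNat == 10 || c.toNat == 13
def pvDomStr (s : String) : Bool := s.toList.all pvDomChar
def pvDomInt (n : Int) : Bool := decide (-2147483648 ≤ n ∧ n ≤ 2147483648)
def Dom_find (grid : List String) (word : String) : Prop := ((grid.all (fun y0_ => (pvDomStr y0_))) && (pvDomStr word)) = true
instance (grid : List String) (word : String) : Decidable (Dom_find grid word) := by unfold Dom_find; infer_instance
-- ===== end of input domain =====

-- B replaces A's per-cell per-direction character walk by a per-direction backward dynamic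
-- program over word suffixes (objective: alternative; return value only, no mutation involved).

-- grid[r][c] as an Option (none exactly where Python raises IndexError); used by both ports
def pvCell (grid : List String) (r c : Int) : Option Char :=
  (PySem.List.pyGet? grid r).bind (fun row => PySem.List.pyGet? row.toList c)

-- ===== PORT A =====
def findIsValid (rows cols r c : Int) : Bool :=
  decide (0 ≤ r ∧ r < rows ∧ 0 ≤ c ∧ c < cols)

-- A's inner `search`: loop over the characters of word, advancing (r, c) by (dr, dc)
def findSearch (grid : List String) (rows cols dr dc : Int) :
    Int → Int → List Char → Bool
  | _, _, [] => true
  | r, c, ch :: rest =>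
    if !(findIsValid rows cols r c) || !(pvCell grid r c == some ch) then false
    else findSearch grid rows cols dr dc (r + dr) (c + dc) rest

def findDirs : List (Int × Int) :=
  [(0, 1), (1, 0), (1, 1), (-1, 1), (0, -1), (-1, 0), (-1, -1), (1, -1)]

def find (grid : List String) (word : String) : List (Int × Int) :=
  let rows : Int := grid.length
  let cols : Int := ((PySem.List.pyGet? grid 0).getD "").toList.length
  (PySem.List.pyRange 0 rows 1).foldl (fun ans r =>
    (PySem.List.pyRange 0 cols 1).foldl (fun ans c =>
      findDirs.foldl (fun ans d =>
        if findSearch grid rows cols d.1 d.2 r c word.toList then ans ++ [(r, c)]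
        else ans) ans) ans) []

-- ===== PORT B =====
def findAltDirs : List (Int × Int) :=
  [(0, 1), (1, 0), (1, 1), (-1, 1), (0, -1), (-1, 0), (-1, -1), (1, -1)]

def findAltCells (rows cols : Int) : List (Int × Int) :=
  (PySem.List.pyRange 0 rows 1).flatMap (fun r =>
    (PySem.List.pyRange 0 cols 1).map (fun c => (r, c)))

-- one DP step: {(r-dr, c-dc) for (r,c) in cur if in-bounds and grid[r-dr][c-dc] == ch};
-- the translation p ↦ p - (dr,dc) is injective and cur has no duplicates, so the Python
-- set comprehension is exactly this filter + map (membership-wise and element-wise)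
def findAltStep (grid : List String) (rows cols dr dc : Int)
    (cur : List (Int × Int)) (ch : Char) : List (Int × Int) :=
  (cur.filter (fun p =>
      decide (0 ≤ p.1 - dr ∧ p.1 - dr < rows ∧ 0 ≤ p.2 - dc ∧ p.2 - dc < cols) &&
      (pvCell grid (p.1 - dr) (p.2 - dc) == some ch))).map
    (fun p => (p.1 - dr, p.2 - dc))

def find_alt (grid : List String) (word : String) : List (Int × Int) :=
  let rows : Int := grid.length
  let cols : Int := ((PySem.List.pyGet? grid 0).getD "").toList.length
  let cells := findAltCells rows cols
  let matchSets := findAltDirs.map (fun d =>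
    match word.toList.reverse with
    | [] => cells
    | last :: restRev =>
        restRev.foldl (findAltStep grid rows cols d.1 d.2)
          (cells.filter (fun p => pvCell grid p.1 p.2 == some last)))
  cells.flatMap (fun p => (matchSets.filter (fun m => m.contains p)).map (fun _ => p))

-- ===== PRECONDITION & SPEC =====
-- Pre_ excludes exactly the inputs where Python raises IndexError: the empty grid (grid[0]),
-- and ragged grids whose later rows are shorter than row 0 when the word is nonempty (then
-- A's very first grid[r][c] on such a row, and B's first DP level, go out of range).
def Pre_find (grid : List String) (word : String) : Prop :=
  grid ≠ [] ∧ (word = "" ∨ ∀ row ∈ grid, (grid.headD "").toList.length ≤ row.toList.length)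
instance (grid : List String) (word : String) : Decidable (Pre_find grid word) := by
  unfold Pre_find; infer_instance

def pvWitness_find : List String × String := (["abca", "bcab", "caba"], "ab")

def Spec_find (grid : List String) (word : String) (out : List (Int × Int)) : Prop := out = find_alt grid word
instance (grid : List String) (word : String) (out : List (Int × Int)) : Decidable (Spec_find grid word out) := by unfold Spec_find; infer_instance

-- ===== CLAIM (what is proved, stated in full; the proofs are below) =====
def Claim_equal_find : Prop := ∀ (grid : List String) (word : String), Dom_find grid word → Pre_find grid word → Spec_find grid word (find grid word)

-- ===== LEMMAS AND PROOFS =====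

-- membership in the cell enumeration = the in-bounds predicate
lemma mem_findAltCells (rows cols : Int) (p : Int × Int) :
    p ∈ findAltCells rows cols ↔ findIsValid rows cols p.1 p.2 = true := by
  simp only [findAltCells, List.mem_flatMap, List.mem_map, PySem.List.mem_pyRange_one,
    findIsValid, decide_eq_true_eq]
  constructor
  · rintro ⟨r, hr, c, hc, rfl⟩; exact ⟨hr.1, hr.2, hc.1, hc.2⟩
  · rintro ⟨h1, h2, h3, h4⟩; exact ⟨p.1, ⟨h1, h2⟩, p.2, ⟨h3, h4⟩, rfl⟩

-- membership after one DP step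
lemma mem_findAltStep (grid : List String) (rows cols dr dc : Int)
    (cur : List (Int × Int)) (ch : Char) (p : Int × Int) :
    p ∈ findAltStep grid rows cols dr dc cur ch ↔
      (findIsValid rows cols p.1 p.2 = true ∧ pvCell grid p.1 p.2 = some ch ∧
        (p.1 + dr, p.2 + dc) ∈ cur) := by
  simp only [findAltStep, List.mem_map, List.mem_filter, Bool.and_eq_true, decide_eq_true_eq,
    beq_iff_eq, findIsValid]
  constructor
  · rintro ⟨q, ⟨hq, hb, hc⟩, rfl⟩
    refine ⟨by omega, hc, ?_⟩
    have : (q.1 - dr + dr, q.2 - dc + dc) = q := by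
      apply Prod.ext <;> simp
    simpa [this] using hq
  · rintro ⟨hb, hc, hq⟩
    refine ⟨(p.1 + dr, p.2 + dc), ⟨hq, ?_, ?_⟩, ?_⟩
    · omega
    · simpa using hc
    · apply Prod.ext <;> simp

-- one unfolding step of A's search loop
lemma findSearch_cons (grid : List String) (rows cols dr dc r c : Int) (ch : Char)
    (rest : List Char) :
    findSearch grid rows cols dr dc r c (ch :: rest) =
      (findIsValid rows cols r c && (pvCell grid r c == some ch) &&
        findSearch grid rows cols dr dc (r + dr) (c + dc) rest) := by
  cases hv : findIsValid rows cols r c <;>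
    cases hc : (pvCell grid r c == some ch) <;> simp [findSearch, hv, hc]

-- DP invariant: cur is exactly the set of start cells from which `suf` matches
def findGood (grid : List String) (rows cols dr dc : Int)
    (cur : List (Int × Int)) (suf : List Char) : Prop :=
  suf ≠ [] ∧ ∀ p : Int × Int,
    (p ∈ cur ↔ findSearch grid rows cols dr dc p.1 p.2 suf = true)

lemma findGood_step (grid : List String) (rows cols dr dc : Int)
    (cur : List (Int × Int)) (suf : List Char) (ch : Char)
    (h : findGood grid rows cols dr dc cur suf) :
    findGood grid rows cols dr dc (findAltStep grid rows cols dr dc cur ch) (ch :: suf) := by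
  obtain ⟨hne, hcur⟩ := h
  refine ⟨by simp, fun p => ?_⟩
  rw [mem_findAltStep, findSearch_cons, hcur ((p.1 + dr, p.2 + dc))]
  simp [Bool.and_eq_true, and_assoc]

lemma findGood_foldl (grid : List String) (rows cols dr dc : Int) :
    ∀ (l : List Char) (cur : List (Int × Int)) (suf : List Char),
      findGood grid rows cols dr dc cur suf →
      findGood grid rows cols dr dc (l.foldl (findAltStep grid rows cols dr dc) cur)
        (l.reverse ++ suf) := by
  intro l
  induction l with
  | nil => intro cur suf h; simpa using h
  | cons ch l ih =>
      intro cur suf h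
      have h2 := findGood_step grid rows cols dr dc cur suf ch h
      have h3 := ih (findAltStep grid rows cols dr dc cur ch) (ch :: suf) h2
      simpa [List.append_assoc] using h3

lemma findGood_init (grid : List String) (rows cols dr dc : Int) (last : Char) :
    findGood grid rows cols dr dc
      ((findAltCells rows cols).filter (fun p => pvCell grid p.1 p.2 == some last))
      [last] := by
  refine ⟨by simp, fun p => ?_⟩
  rw [List.mem_filter, mem_findAltCells, findSearch_cons]
  simp [findSearch]

-- per-direction DP result ↔ A's per-cell search, for any cell of the grid
lemma contains_dir_eq_search (grid : List String) (rows cols dr dc : Int)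
    (w : List Char) (p : Int × Int) (hp : p ∈ findAltCells rows cols) :
    (match w.reverse with
      | [] => findAltCells rows cols
      | last :: restRev =>
          restRev.foldl (findAltStep grid rows cols dr dc)
            ((findAltCells rows cols).filter
              (fun q => pvCell grid q.1 q.2 == some last))).contains p
      = findSearch grid rows cols dr dc p.1 p.2 w := by
  cases hw : w.reverse with
  | nil =>
      rw [List.reverse_eq_nil_iff] at hw
      subst hw
      show (findAltCells rows cols).contains p = true
      simpa [List.contains_iff_mem] using hp
  | cons last restRev =>
      have hwe : w = restRev.reverse ++ [last] := by
        have := congrArg List.reverse hw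
        simpa using this
      have hg := findGood_foldl grid rows cols dr dc restRev
        ((findAltCells rows cols).filter (fun q => pvCell grid q.1 q.2 == some last))
        [last] (findGood_init grid rows cols dr dc last)
      rw [Bool.eq_iff_iff]
      simp only [List.contains_iff_mem]
      rw [hwe]
      exact hg.2 p

-- A's triple loop in flatMap/filter form
lemma find_eq_flatMap (grid : List String) (word : String) :
    find grid word =
      (findAltCells (grid.length : Int)
          (((PySem.List.pyGet? grid 0).getD "").toList.length : Int)).flatMap
        (fun p =>
          ((findDirs.filter (fun d =>
              findSearch grid (grid.length : Int)
                (((PySem.List.pyGet? grid 0).getD "").toList.length : Int)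
                d.1 d.2 p.1 p.2 word.toList)).map (fun _ => p))) := by
  unfold find
  simp only [PySem.List.foldl_append_if, PySem.List.foldl_append_eq_flatMap, List.nil_append]
  rw [findAltCells, List.flatMap_assoc]
  refine List.flatMap_congr (fun r _ => ?_)
  rw [List.flatMap_map]

-- ===== VERDICT (by name: the statement is the Claim_ definition above) =====
theorem find_spec : Claim_equal_find := by
  intro grid word hdom hpre
  show find grid word = find_alt grid word
  rw [find_eq_flatMap]
  unfold find_alt
  refine List.flatMap_congr (fun p hp => ?_)
  rw [List.filter_map, List.map_map]
  refine congrArg (List.map _) ?_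
  refine (List.filter_congr (fun d _ => ?_)).symm
  exact contains_dir_eq_search grid (grid.length : Int)
    (((PySem.List.pyGet? grid 0).getD "").toList.length : Int) d.1 d.2 word.toList p hp
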